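-- pv_equiv track=rewrite | github.com/Cycyber/CCPS109---Computer-Science-1 | labs109.py | reverse_ascending_sublists
-- ===== SOURCE A (Python) =====
-- def reverse_ascending_sublists(items):
--     # can also add to list and do list.reverse() or add to new list and list.clear()
--     new_filtered = []
--     filtered = []
--     for item in items:
--         if len(filtered) == 0:
--             filtered.append(item)
--         else:
--             if item > filtered[0]:
--                 filtered.insert(0, item) #add bigger item at index 0 = Reverse list
--             else:
--                 new_filtered.extend(filtered)
--                 filtered = [item]
--     new_filtered.extend(filtered)
--     return new_filtered
-- ===== SOURCE B (Python) =====
-- def reverse_ascending_sublists(items):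
--     # Right-to-left pass: a strictly-ascending forward run is collected in
--     # reversed order for free; chunks come out in reverse run order, so
--     # reverse the chunk list once at the end and concatenate.
--     chunks = []
--     run = []
--     for x in reversed(items):
--         if run and x >= run[-1]:
--             chunks.append(run)
--             run = [x]
--         else:
--             run.append(x)
--     chunks.append(run)
--     out = []
--     for run in reversed(chunks):
--         out += run
--     return out
-- ===== Notes on version B (the rewrite author's own statement) =====
-- stated objective: alternative
-- what changed: B scans the list right-to-left so each strictly-ascending run accumulates already reversed by plain appends, collecting runs as chunks and reversing the chunk list once at the end, instead of A's left-to-right pass that keeps the current run reversed by insert(0, item).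
import Mathlib
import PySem

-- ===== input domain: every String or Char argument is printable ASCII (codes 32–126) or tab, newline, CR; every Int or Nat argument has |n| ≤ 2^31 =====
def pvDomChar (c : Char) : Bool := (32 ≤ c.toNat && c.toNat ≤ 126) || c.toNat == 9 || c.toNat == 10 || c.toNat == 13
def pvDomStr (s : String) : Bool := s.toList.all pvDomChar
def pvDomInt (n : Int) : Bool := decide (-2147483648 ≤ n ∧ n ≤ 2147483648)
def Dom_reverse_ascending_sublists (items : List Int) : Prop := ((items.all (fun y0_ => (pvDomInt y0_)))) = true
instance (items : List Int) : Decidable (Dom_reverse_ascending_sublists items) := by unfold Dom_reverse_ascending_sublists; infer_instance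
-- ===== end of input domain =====

-- B traverses the list right-to-left, so each ascending run is collected already reversed,
-- and reverses the chunk list once at the end (alternative decomposition; A goes left-to-right
-- maintaining the current run reversed via insert at index 0).


-- ===== PORT A =====
-- state: (new_filtered, filtered); filtered[0] is read only when filtered is nonempty, so headI is exact
def pvStepA (st : List Int × List Int) (item : Int) : List Int × List Int :=
  if st.2.length = 0 then (st.1, st.2 ++ [item])
  else if item > st.2.headI then (st.1, item :: st.2)
  else (st.1 ++ st.2, [item])

def reverse_ascending_sublists (items : List Int) : List Int :=
  let s := items.foldl pvStepA ([], [])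
  s.1 ++ s.2

-- ===== PORT B =====
-- state: (chunks, run); run[-1] is read only when run is nonempty, so getLast! is exact
def pvStepB (st : List (List Int) × List Int) (x : Int) : List (List Int) × List Int :=
  if st.2 ≠ [] ∧ st.2.getLast! ≤ x then (st.1 ++ [st.2], [x]) else (st.1, st.2 ++ [x])

def reverse_ascending_sublists_alt (items : List Int) : List Int :=
  let s := items.reverse.foldl pvStepB ([], [])
  ((s.1 ++ [s.2]).reverse).foldl (· ++ ·) []

-- ===== PRECONDITION & SPEC =====
def Spec_reverse_ascending_sublists (items : List Int) (out : List Int) : Prop := out = reverse_ascending_sublists_alt items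
instance (items : List Int) (out : List Int) : Decidable (Spec_reverse_ascending_sublists items out) := by unfold Spec_reverse_ascending_sublists; infer_instance

-- ===== CLAIM (what is proved, stated in full; the proofs are below) =====
def Claim_equal_reverse_ascending_sublists : Prop := ∀ (items : List Int), Dom_reverse_ascending_sublists items → Spec_reverse_ascending_sublists items (reverse_ascending_sublists items)

-- ===== LEMMAS AND PROOFS =====

-- reference spec: split off the longest strictly-ascending run, reverse it, recurse
def pvRun (prev : Int) : List Int → List Int × List Int
  | [] => ([], [])
  | y :: ys => if prev < y then (y :: (pvRun y ys).1, (pvRun y ys).2) else ([], y :: ys)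

theorem pvRun_snd_length (l : List Int) : ∀ prev, (pvRun prev l).2.length ≤ l.length := by
  induction l with
  | nil => intro prev; simp [pvRun]
  | cons y ys ih =>
    intro prev
    simp only [pvRun]
    split_ifs with h
    · exact le_trans (ih y) (Nat.le_succ _)
    · simp

def pvSpec : List Int → List Int
  | [] => []
  | x :: xs =>
    (x :: (pvRun x xs).1).reverse ++ pvSpec (pvRun x xs).2
termination_by l => l.length
decreasing_by
  exact Nat.lt_succ_of_le (pvRun_snd_length xs x)

theorem pv_headI_reverse (run : List Int) (h : run ≠ []) : run.reverse.headI = run.getLast! := by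
  cases hr : run.reverse with
  | nil => simp at hr; exact absurd hr h
  | cons a as =>
    have h2 : run.getLast? = some a := by rw [← List.head?_reverse, hr]; rfl
    simp [List.headI, List.getLast!_eq_getLast?_getD, h2]

theorem pv_getLast!_reverse_cons (x : Int) (l : List Int) : ((x :: l).reverse).getLast! = x := by
  simp [List.getLast!_eq_getLast?_getD]

-- A's loop invariant: with a nonempty run held reversed in `filtered`,
-- the fold finishes the current run and then behaves like pvSpec
theorem pv_A_loop : ∀ (items nf run : List Int), run ≠ [] →
    (items.foldl pvStepA (nf, run.reverse)).1 ++ (items.foldl pvStepA (nf, run.reverse)).2 =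
      nf ++ (run ++ (pvRun run.getLast! items).1).reverse ++ pvSpec (pvRun run.getLast! items).2 := by
  intro items
  induction items with
  | nil => intro nf run h; simp [pvRun, pvSpec]
  | cons y ys ih =>
    intro nf run h
    simp only [List.foldl_cons]
    by_cases hy : run.getLast! < y
    · have h2 : run.reverse.headI < y := by rw [pv_headI_reverse run h]; exact hy
      have hst : pvStepA (nf, run.reverse) y = (nf, (run ++ [y]).reverse) := by
        simp [pvStepA, h, h2]
      rw [hst]
      have hne : run ++ [y] ≠ [] := by simp
      have hlast : (run ++ [y]).getLast! = y := by
        have : (run ++ [y]).getLast? = some y := by simp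
        simp [List.getLast!_eq_getLast?_getD, this]
      have hih := ih nf (run ++ [y]) hne
      rw [hlast] at hih
      rw [hih]
      have hy' : run.getLast?.getD 0 < y := by
        simpa [List.getLast!_eq_getLast?_getD] using hy
      simp [pvRun, hy']
    · have h2 : ¬ run.reverse.headI < y := by rw [pv_headI_reverse run h]; exact hy
      have hst : pvStepA (nf, run.reverse) y = (nf ++ run.reverse, ([y] : List Int).reverse) := by
        simp [pvStepA, h, h2]
      rw [hst]
      have hih := ih (nf ++ run.reverse) [y] (by simp)
      have hl : ([y] : List Int).getLast! = y := rfl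
      rw [hl] at hih
      rw [hih]
      have hy' : ¬ run.getLast?.getD 0 < y := by
        simpa [List.getLast!_eq_getLast?_getD] using hy
      simp [pvRun, hy', pvSpec]

theorem pv_A_spec (items : List Int) : reverse_ascending_sublists items = pvSpec items := by
  cases items with
  | nil => simp [reverse_ascending_sublists, pvSpec]
  | cons x xs =>
    unfold reverse_ascending_sublists
    simp only [List.foldl_cons]
    have hst : pvStepA ([], []) x = ([], ([x] : List Int).reverse) := by simp [pvStepA]
    rw [hst]
    have hih := pv_A_loop xs [] [x] (by simp)
    have hl : ([x] : List Int).getLast! = x := rfl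
    rw [hl] at hih
    simp only [List.nil_append] at hih
    rw [hih]
    conv_rhs => rw [pvSpec.eq_def]
    simp

-- turning the chunk list into output (the final loop over reversed(chunks))
theorem pv_foldr_append (ls : List (List Int)) : ∀ acc : List Int,
    ls.foldr (fun x y => y ++ x) acc = acc ++ ls.reverse.flatten := by
  induction ls with
  | nil => intro acc; simp
  | cons a as ih => intro acc; simp [List.foldr_cons, ih]

-- B's loop invariant, by induction on the (un-reversed) suffix being processed
theorem pv_B_loop : ∀ (xs : List Int) (x : Int),
    ∃ Cs : List (List Int),
      (x :: xs).foldr (fun a s => pvStepB s a) ([], []) =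
        (Cs, ((x :: (pvRun x xs).1)).reverse) ∧
      Cs.reverse.flatten = pvSpec (pvRun x xs).2 := by
  intro xs
  induction xs with
  | nil =>
    intro x
    refine ⟨[], ?_, by simp [pvRun, pvSpec]⟩
    simp [pvStepB, pvRun]
  | cons y ys ih =>
    intro x
    obtain ⟨Cs, hst, hflat⟩ := ih y
    simp only [List.foldr_cons] at hst ⊢
    rw [hst]
    by_cases hxy : x < y
    · refine ⟨Cs, ?_, ?_⟩
      · have hc : ¬ ((y :: (pvRun y ys).1).reverse ≠ [] ∧
            ((y :: (pvRun y ys).1).reverse).getLast! ≤ x) := by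
          rw [pv_getLast!_reverse_cons]
          omega
        simp only [pvStepB, if_neg hc]
        simp [pvRun, hxy, List.cons_append]
      · simp [pvRun, hxy, hflat]
    · refine ⟨Cs ++ [(y :: (pvRun y ys).1).reverse], ?_, ?_⟩
      · have hc : (y :: (pvRun y ys).1).reverse ≠ [] ∧
            ((y :: (pvRun y ys).1).reverse).getLast! ≤ x := by
          constructor
          · simp
          · rw [pv_getLast!_reverse_cons]; omega
        simp only [pvStepB, if_pos hc]
        simp [pvRun, hxy]
      · simp only [pvRun, if_neg hxy]
        rw [pvSpec.eq_def]
        simp [hflat]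

theorem pv_B_spec (items : List Int) : reverse_ascending_sublists_alt items = pvSpec items := by
  cases items with
  | nil => simp [reverse_ascending_sublists_alt, pvSpec]
  | cons x xs =>
    unfold reverse_ascending_sublists_alt
    simp only [List.foldl_reverse]
    obtain ⟨Cs, hst, hflat⟩ := pv_B_loop xs x
    rw [hst]
    simp only []
    rw [pv_foldr_append]
    rw [pvSpec.eq_def]
    simp [hflat]

-- ===== VERDICT (by name: the statement is the Claim_ definition above) =====
theorem reverse_ascending_sublists_spec : Claim_equal_reverse_ascending_sublists := by
  intro items _
  unfold Spec_reverse_ascending_sublists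
  rw [pv_A_spec, pv_B_spec]
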